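-- pv_equiv track=rewrite | github.com/MrBrantCode/unitest_baseline | mut_generate/mist_train_cf/cf_8781/solution.py | get_uppercase_words
-- ===== SOURCE A (Python) =====
-- def get_uppercase_words(string: str) -> list[str]:
--     words = []
--     word = ""
--     for char in string:
--         if char == " ":
--             if word != "":
--                 words.append(word)
--                 word = ""
--         elif char.isupper():
--             word += char
--     if word != "":
--         words.append(word)
--     return words
-- ===== SOURCE B (Python) =====
-- def get_uppercase_words(string: str) -> list[str]:
--     result = []
--     for seg in string.split(" "):
--         w = "".join(c for c in seg if c.isupper())
--         if w:
--             result.append(w)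
--     return result
-- ===== Notes on version B (the rewrite author's own statement) =====
-- stated objective: simpler
-- what changed: Replaced A's char-by-char state machine (accumulate uppercase chars, flush the pending word on each space and at the end) by a split-on-space pass that filters each segment to its uppercase subsequence and keeps the non-empty ones.
import Mathlib
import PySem

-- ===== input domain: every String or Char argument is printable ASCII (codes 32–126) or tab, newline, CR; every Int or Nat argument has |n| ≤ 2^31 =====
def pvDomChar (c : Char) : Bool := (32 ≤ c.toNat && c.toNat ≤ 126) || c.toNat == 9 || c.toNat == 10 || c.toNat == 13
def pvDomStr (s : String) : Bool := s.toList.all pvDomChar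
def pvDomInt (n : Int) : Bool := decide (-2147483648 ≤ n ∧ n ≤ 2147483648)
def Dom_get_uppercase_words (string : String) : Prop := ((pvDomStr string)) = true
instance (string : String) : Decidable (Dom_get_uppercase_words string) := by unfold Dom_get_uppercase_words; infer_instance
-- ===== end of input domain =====

-- B replaces A's char-by-char accumulate/flush state machine by split-on-space then
-- per-segment uppercase filtering; objective: simpler.

-- ===== PORT A =====
-- A's loop: state (words, word); flush word on ' ', append uppercase chars, final flush.
def get_uppercase_words (string : String) : List String :=
  let r := string.toList.foldl
    (fun (st : List String × List Char) char =>
      if char == ' ' then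
        (if st.2 ≠ [] then (st.1 ++ [String.ofList st.2], ([] : List Char)) else st)
      else if PySem.Chars.isupper char then (st.1, st.2 ++ [char])
      else st) ([], [])
  if r.2 ≠ [] then r.1 ++ [String.ofList r.2] else r.1

-- ===== PORT B =====
-- B: string.split(" "), then for each segment ''.join(c for c in seg if c.isupper())
-- (on chars, join of the filtered generator IS List.filter), kept if non-empty.
def get_uppercase_words_alt (string : String) : List String :=
  (PySem.Chars.splitOn string.toList [' ']).foldl
    (fun acc seg =>
      let w := seg.filter PySem.Chars.isupper
      if w ≠ [] then acc ++ [String.ofList w] else acc) []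

-- ===== PRECONDITION & SPEC =====
def Spec_get_uppercase_words (string : String) (out : List String) : Prop := out = get_uppercase_words_alt string
instance (string : String) (out : List String) : Decidable (Spec_get_uppercase_words string out) := by unfold Spec_get_uppercase_words; infer_instance

-- ===== CLAIM (what is proved, stated in full; the proofs are below) =====
def Claim_equal_get_uppercase_words : Prop := ∀ (string : String), Dom_get_uppercase_words string → Spec_get_uppercase_words string (get_uppercase_words string)

-- ===== LEMMAS AND PROOFS =====

-- Named forms of the two ports' loop bodies (definitionally equal to the lambdas above).
def pvStepA (st : List String × List Char) (char : Char) : List String × List Char :=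
  if char == ' ' then
    (if st.2 ≠ [] then (st.1 ++ [String.ofList st.2], ([] : List Char)) else st)
  else if PySem.Chars.isupper char then (st.1, st.2 ++ [char])
  else st

def pvFinishA (r : List String × List Char) : List String :=
  if r.2 ≠ [] then r.1 ++ [String.ofList r.2] else r.1

def pvStepB (acc : List String) (seg : List Char) : List String :=
  let w := seg.filter PySem.Chars.isupper
  if w ≠ [] then acc ++ [String.ofList w] else acc

-- Common specification: the result given a pending uppercase word and the rest of the chars.
def pvSpec (pending : List Char) : List Char → List String
  | [] => if pending ≠ [] then [String.ofList pending] else []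
  | c :: cs =>
    if c = ' ' then
      (if pending ≠ [] then String.ofList pending :: pvSpec [] cs else pvSpec [] cs)
    else if PySem.Chars.isupper c then pvSpec (pending ++ [c]) cs
    else pvSpec pending cs

-- Structural form of split-on-single-space with a reversed pending prefix.
def pvSplit1 (cur : List Char) : List Char → List (List Char)
  | [] => [cur.reverse]
  | c :: cs => if c = ' ' then cur.reverse :: pvSplit1 [] cs else pvSplit1 (c :: cur) cs

theorem pvA_fold (cs : List Char) : ∀ (words : List String) (word : List Char),
    pvFinishA (cs.foldl pvStepA (words, word)) = words ++ pvSpec word cs := by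
  induction cs with
  | nil =>
    intro words word
    simp only [List.foldl_nil, pvFinishA, pvSpec]
    split_ifs <;> simp
  | cons c cs ih =>
    intro words word
    rw [List.foldl_cons]
    by_cases hsp : c = ' '
    · subst hsp
      by_cases hw : word = []
      · simp [pvStepA, pvSpec, hw, ih]
      · simp [pvStepA, pvSpec, hw, ih, List.append_assoc]
    · have hb : (c == ' ') = false := by simpa using hsp
      by_cases hu : PySem.Chars.isupper c = true
      · simp [pvStepA, pvSpec, hb, hsp, hu, ih]
      · simp [pvStepA, pvSpec, hb, hsp, hu, ih]

theorem pvSplit_go (cs : List Char) : ∀ (fuel : Nat) (cur : List Char)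
    (acc : List (List Char)), cs.length ≤ fuel →
    PySem.Chars.splitOn.go [' '] fuel cs cur acc = acc.reverse ++ pvSplit1 cur cs := by
  induction cs with
  | nil =>
    intro fuel cur acc _
    cases fuel <;> simp [PySem.Chars.splitOn.go, pvSplit1]
  | cons c cs ih =>
    intro fuel cur acc hf
    cases fuel with
    | zero => simp at hf
    | succ fuel =>
      have hf' : cs.length ≤ fuel := by simpa using hf
      rw [PySem.Chars.splitOn.go]
      by_cases hsp : c = ' '
      · subst hsp
        have hpre : List.isPrefixOf [' '] (' ' :: cs) = true := by
          simp [List.isPrefixOf]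
        simp only [hpre, if_pos, List.length_cons, List.length_nil, List.drop_succ_cons,
          List.drop_zero]
        rw [ih fuel [] (cur.reverse :: acc) hf']
        simp [pvSplit1]
      · have hpre : List.isPrefixOf [' '] (c :: cs) = false := by
          simp only [List.isPrefixOf, Bool.and_eq_false_iff, beq_eq_false_iff_ne, ne_eq]
          exact Or.inl fun h => hsp h.symm
        simp only [hpre, Bool.false_eq_true, if_neg, not_false_iff]
        rw [ih fuel (c :: cur) acc hf']
        simp [pvSplit1, hsp]

theorem pvB_fold (cs : List Char) : ∀ (cur : List Char) (acc : List String),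
    (pvSplit1 cur cs).foldl pvStepB acc
      = acc ++ pvSpec (cur.reverse.filter PySem.Chars.isupper) cs := by
  induction cs with
  | nil =>
    intro cur acc
    simp only [pvSplit1, pvSpec, List.foldl_cons, List.foldl_nil, pvStepB]
    split_ifs <;> simp
  | cons c cs ih =>
    intro cur acc
    simp only [pvSplit1, pvSpec]
    by_cases hsp : c = ' '
    · subst hsp
      rw [if_pos rfl, if_pos rfl, List.foldl_cons, ih [] _]
      simp only [pvStepB]
      split_ifs <;> simp
    · rw [if_neg hsp, if_neg hsp, ih (c :: cur)]
      by_cases hu : PySem.Chars.isupper c = true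
      · simp [hu, List.filter_append]
      · simp only [Bool.not_eq_true] at hu
        simp [List.filter_append, hu]

-- ===== VERDICT (by name: the statement is the Claim_ definition above) =====
theorem get_uppercase_words_spec : Claim_equal_get_uppercase_words := by
  intro s _
  unfold Spec_get_uppercase_words get_uppercase_words get_uppercase_words_alt
  show pvFinishA (s.toList.foldl pvStepA ([], []))
      = (PySem.Chars.splitOn s.toList [' ']).foldl pvStepB []
  rw [pvA_fold]
  unfold PySem.Chars.splitOn
  rw [pvSplit_go s.toList (s.toList.length + 1) [] [] (by omega)]
  simp only [List.reverse_nil, List.nil_append]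
  rw [pvB_fold]
  simp
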